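-- pv_equiv track=rewrite | github.com/ErinZhang1998/sketch_collection | read_datasets.py | stroke52abspoints
-- ===== SOURCE A (Python) =====
-- def stroke52abspoints(data):
--     abspoints = []
--     stroke_group = []
--     stroke_group_idx = -1
--     abs_x = 25
--     abs_y = 25
--     next_is_gap = 1
--     for offset_x,offset_y,p1,p2,p3 in data:
--         if next_is_gap:
--             begin_point = [abs_x+offset_x,abs_y+offset_y]
--             stroke_group_idx+=1
--         else:
--             begin_point = [abs_x,abs_y]
--         end_point = [abs_x+offset_x,abs_y+offset_y]
--         abs_x +=offset_x
--         abs_y +=offset_y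
--
--         if p1 == 1:
--             next_is_gap = 0
--         elif p2 == 1 or p3 == 1:
--             next_is_gap = 1
--
--         abspoints.append([begin_point,end_point])
--         stroke_group.append(stroke_group_idx)
--
--     return abspoints,stroke_group
-- ===== SOURCE B (Python) =====
-- def stroke52abspoints(data):
--     # positions[i] = absolute point before step i (prefix sums from (25, 25))
--     positions = [(25, 25)]
--     x, y = 25, 25
--     for dx, dy, _, _, _ in data:
--         x += dx
--         y += dy
--         positions.append((x, y))
--     # gaps[i] = pen-gap flag in force when step i starts
--     gaps = []
--     g = 1
--     for _, _, p1, p2, p3 in data: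
--         gaps.append(g)
--         if p1 == 1:
--             g = 0
--         elif p2 == 1 or p3 == 1:
--             g = 1
--     # cumulative stroke-group index
--     groups = []
--     idx = -1
--     for g in gaps:
--         idx += g
--         groups.append(idx)
--     abspoints = [[list(cur) if g else list(prev), list(cur)]
--                  for (prev, cur), g in zip(zip(positions, positions[1:]), gaps)]
--     return abspoints, groups
-- ===== Notes on version B (the rewrite author's own statement) =====
-- stated objective: alternative
-- what changed: Replaces A's single mutating loop over six state variables by three independent scans (prefix-sum positions table, gap-flag scan, cumulative group index) plus a zip-based assembly of the segments.
import Mathlib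
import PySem

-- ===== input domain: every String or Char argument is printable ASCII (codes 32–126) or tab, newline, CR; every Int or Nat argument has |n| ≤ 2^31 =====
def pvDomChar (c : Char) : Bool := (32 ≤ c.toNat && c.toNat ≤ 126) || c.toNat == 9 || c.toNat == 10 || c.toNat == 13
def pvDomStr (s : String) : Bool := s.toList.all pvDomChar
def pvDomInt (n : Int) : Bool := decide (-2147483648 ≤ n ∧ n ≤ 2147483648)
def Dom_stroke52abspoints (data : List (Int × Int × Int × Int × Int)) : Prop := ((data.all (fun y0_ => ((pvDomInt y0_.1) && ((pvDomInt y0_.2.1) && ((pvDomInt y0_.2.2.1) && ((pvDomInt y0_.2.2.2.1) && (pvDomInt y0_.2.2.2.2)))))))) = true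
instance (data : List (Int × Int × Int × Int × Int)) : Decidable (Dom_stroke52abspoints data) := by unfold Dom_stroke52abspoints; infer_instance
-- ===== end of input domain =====

-- B replaces A's single mutating loop by three independent scans (positions prefix sums,
-- gap flags, cumulative group index) plus a zip-based assembly; same cost, different decomposition.

-- ===== PORT A =====
-- the for-loop of A, state = (abspoints, stroke_group, stroke_group_idx, abs_x, abs_y, next_is_gap)
def strokeLoopA : List (Int × Int × Int × Int × Int) → List (List (List Int)) → List Int →
    Int → Int → Int → Int → List (List (List Int)) × List Int
  | [], acc, grp, _, _, _, _ => (acc, grp)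
  | (dx, dy, p1, p2, p3) :: rest, acc, grp, idx, ax, ay, g =>
      let idx' := if g ≠ 0 then idx + 1 else idx
      let beginPt := if g ≠ 0 then [ax + dx, ay + dy] else [ax, ay]
      let endPt := [ax + dx, ay + dy]
      let g' : Int := if p1 = 1 then 0 else if p2 = 1 ∨ p3 = 1 then 1 else g
      strokeLoopA rest (acc ++ [[beginPt, endPt]]) (grp ++ [idx']) idx' (ax + dx) (ay + dy) g'

def stroke52abspoints (data : List (Int × Int × Int × Int × Int)) : List (List (List Int)) × List Int :=
  strokeLoopA data [] [] (-1) 25 25 1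

-- ===== PORT B =====
-- Source B's gap-flag scan: gaps[i] = flag in force when step i starts
def gapScan : Int → List (Int × Int × Int × Int × Int) → List Int
  | _, [] => []
  | g, (_, _, p1, p2, p3) :: rest =>
      g :: gapScan (if p1 = 1 then 0 else if p2 = 1 ∨ p3 = 1 then 1 else g) rest

def stroke52abspoints_alt (data : List (Int × Int × Int × Int × Int)) : List (List (List Int)) × List Int :=
  let positions := List.scanl (fun p d => (p.1 + d.1, p.2 + d.2)) ((25 : Int), (25 : Int))
      (data.map (fun r => (r.1, r.2.1)))
  let gaps := gapScan 1 data
  let groups := (List.scanl (· + ·) (-1 : Int) gaps).tail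
  let abspoints := ((positions.zip positions.tail).zip gaps).map
      (fun pg => [if pg.2 ≠ 0 then [pg.1.2.1, pg.1.2.2] else [pg.1.1.1, pg.1.1.2],
                  [pg.1.2.1, pg.1.2.2]])
  (abspoints, groups)

-- ===== PRECONDITION & SPEC =====
def Spec_stroke52abspoints (data : List (Int × Int × Int × Int × Int)) (out : List (List (List Int)) × List Int) : Prop := out = stroke52abspoints_alt data
instance (data : List (Int × Int × Int × Int × Int)) (out : List (List (List Int)) × List Int) : Decidable (Spec_stroke52abspoints data out) := by unfold Spec_stroke52abspoints; infer_instance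

-- ===== CLAIM (what is proved, stated in full; the proofs are below) =====
def Claim_equal_stroke52abspoints : Prop := ∀ (data : List (Int × Int × Int × Int × Int)), Dom_stroke52abspoints data → Spec_stroke52abspoints data (stroke52abspoints data)

-- ===== LEMMAS AND PROOFS =====

-- ===== VERDICT (by name: the statement is the Claim_ definition above) =====
-- generalized form of B's computation, for the induction
def altGen (data : List (Int × Int × Int × Int × Int)) (ax ay g idx : Int) :
    List (List (List Int)) × List Int :=
  let positions := List.scanl (fun p d => (p.1 + d.1, p.2 + d.2)) (ax, ay)
      (data.map (fun r => (r.1, r.2.1)))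
  let gaps := gapScan g data
  let groups := (List.scanl (· + ·) idx gaps).tail
  let abspoints := ((positions.zip positions.tail).zip gaps).map
      (fun pg => [if pg.2 ≠ 0 then [pg.1.2.1, pg.1.2.2] else [pg.1.1.1, pg.1.1.2],
                  [pg.1.2.1, pg.1.2.2]])
  (abspoints, groups)

lemma alt_eq_gen (data : List (Int × Int × Int × Int × Int)) :
    stroke52abspoints_alt data = altGen data 25 25 1 (-1) := rfl

lemma altGen_nil (ax ay g idx : Int) : altGen [] ax ay g idx = ([], []) := rfl

lemma altGen_cons (dx dy p1 p2 p3 ax ay g idx : Int)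
    (rest : List (Int × Int × Int × Int × Int)) :
    altGen ((dx, dy, p1, p2, p3) :: rest) ax ay g idx =
      ([if g ≠ 0 then [ax + dx, ay + dy] else [ax, ay], [ax + dx, ay + dy]] ::
        (altGen rest (ax + dx) (ay + dy)
          (if p1 = 1 then 0 else if p2 = 1 ∨ p3 = 1 then 1 else g) (idx + g)).1,
       (idx + g) ::
        (altGen rest (ax + dx) (ay + dy)
          (if p1 = 1 then 0 else if p2 = 1 ∨ p3 = 1 then 1 else g) (idx + g)).2) := by
  cases rest with
  | nil => simp [altGen, gapScan, List.scanl]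
  | cons b t =>
    obtain ⟨dx2, dy2, q1, q2, q3⟩ := b
    simp [altGen, gapScan, List.scanl]

lemma loop_eq (data : List (Int × Int × Int × Int × Int)) :
    ∀ acc grp idx ax ay g, g = 0 ∨ g = 1 →
      strokeLoopA data acc grp idx ax ay g =
        (acc ++ (altGen data ax ay g idx).1, grp ++ (altGen data ax ay g idx).2) := by
  induction data with
  | nil => intro acc grp idx ax ay g _; simp [strokeLoopA, altGen_nil]
  | cons hd rest ih =>
    intro acc grp idx ax ay g hg
    obtain ⟨dx, dy, p1, p2, p3⟩ := hd
    have hg' : (if p1 = 1 then (0:Int) else if p2 = 1 ∨ p3 = 1 then 1 else g) = 0 ∨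
        (if p1 = 1 then (0:Int) else if p2 = 1 ∨ p3 = 1 then 1 else g) = 1 := by
      split_ifs <;> simp [hg]
    have hidx : (if g ≠ 0 then idx + 1 else idx) = idx + g := by
      rcases hg with h | h <;> simp [h]
    rw [strokeLoopA, altGen_cons]
    simp only [hidx]
    rw [ih _ _ _ _ _ _ hg']
    simp

theorem stroke52abspoints_spec : Claim_equal_stroke52abspoints := by
  intro data _
  unfold Spec_stroke52abspoints stroke52abspoints
  rw [alt_eq_gen, loop_eq data [] [] (-1) 25 25 1 (Or.inr rfl)]
  simp
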